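-- pv_equiv track=rewrite | github.com/migueldpgarcia/Jogo_Sete_E_Meio | Sete_E_Meio.py | POR_ESCRITO
-- ===== SOURCE A (Python) =====
-- def POR_ESCRITO(string):
--     string_nova = ''
--     i = 0
--     while i < len(string):
--         if i > 0:
--             string_nova += 'e '
--         if string[i] == '1':
--             string_nova += 'um'
--         elif string[i] == '2':
--             string_nova += 'dois'
--         elif string[i] == '3':
--             string_nova += 'tres'
--         elif string[i] == '4':
--             string_nova += 'quatro'
--         elif string[i] == '5':
--             string_nova += 'cinco'
--         elif string[i] == '6':
--             string_nova += 'seis'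
--         elif string[i] == '7':
--             string_nova += 'sete'
--         elif string[i] == 'J':
--             string_nova += 'valete'
--         elif string[i] == 'Q':
--             string_nova += 'dama'
--         elif string[i] == 'K':
--             string_nova += 'rei'
--         if i < len(string) - 1:
--             string_nova += ' ' #Porque só a ultima palavra não terá o espaço, conforme a saida do anunciado
--         i += 1
--     return string_nova
-- ===== SOURCE B (Python) =====
-- _WORDS = {'1': 'um', '2': 'dois', '3': 'tres', '4': 'quatro', '5': 'cinco',
--           '6': 'seis', '7': 'sete', 'J': 'valete', 'Q': 'dama', 'K': 'rei'}
--
-- def POR_ESCRITO(string):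
--     # Divide and conquer: a single char maps to its word ('' if unknown);
--     # a longer string is the two halves' renderings glued with ' e '.
--     # Correct because every char contributes exactly one piece and the
--     # separator appears exactly once between consecutive pieces (n-1 total).
--     if len(string) == 0:
--         return ''
--     if len(string) == 1:
--         return _WORDS.get(string, '')
--     mid = len(string) // 2
--     return POR_ESCRITO(string[:mid]) + ' e ' + POR_ESCRITO(string[mid:])
-- ===== Notes on version B (the rewrite author's own statement) =====
-- stated objective: alternative
-- what changed: Replaces A's linear index loop with per-position separator branches and repeated string concatenation by a divide-and-conquer recursion: a single char maps to its word via a lookup table and a longer string is the two halves' renderings joined with ' e '.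
import Mathlib
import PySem

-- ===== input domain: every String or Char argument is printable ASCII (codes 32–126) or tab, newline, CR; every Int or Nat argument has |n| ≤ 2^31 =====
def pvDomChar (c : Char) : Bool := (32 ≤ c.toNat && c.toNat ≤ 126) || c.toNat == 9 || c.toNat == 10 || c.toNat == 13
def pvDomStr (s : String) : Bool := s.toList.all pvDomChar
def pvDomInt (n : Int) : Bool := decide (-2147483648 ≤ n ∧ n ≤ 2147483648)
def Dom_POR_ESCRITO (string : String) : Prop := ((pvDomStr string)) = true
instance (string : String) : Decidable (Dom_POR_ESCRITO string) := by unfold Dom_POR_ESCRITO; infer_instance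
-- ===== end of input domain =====

-- B replaces A's linear index loop with per-position separator branches by a
-- divide-and-conquer recursion: one char -> its word via a lookup table, a longer
-- string -> the two halves' renderings joined with ' e ' (alternative decomposition).

-- ===== PORT A =====
-- the if/elif chain of A, returning the chunk appended at position i ([] when no branch fires)
def pvWordA (c : Char) : List Char :=
  if c = '1' then "um".toList
  else if c = '2' then "dois".toList
  else if c = '3' then "tres".toList
  else if c = '4' then "quatro".toList
  else if c = '5' then "cinco".toList
  else if c = '6' then "seis".toList
  else if c = '7' then "sete".toList
  else if c = 'J' then "valete".toList
  else if c = 'Q' then "dama".toList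
  else if c = 'K' then "rei".toList
  else []

-- the while loop of A, step for step (string_nova is acc, as a list of chars)
def pvLoopA (cs : List Char) (i : Nat) (acc : List Char) : List Char :=
  if i < cs.length then
    let acc1 := if i > 0 then acc ++ "e ".toList else acc
    let acc2 := acc1 ++ pvWordA (cs.getD i ' ')
    let acc3 := if i < cs.length - 1 then acc2 ++ [' '] else acc2
    pvLoopA cs (i + 1) acc3
  else acc
termination_by cs.length - i

def POR_ESCRITO (string : String) : String :=
  String.ofList (pvLoopA string.toList 0 [])

-- ===== PORT B =====
def pvWordsDict : PySem.Dict Char String :=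
  PySem.Dict.ofList [('1', "um"), ('2', "dois"), ('3', "tres"), ('4', "quatro"), ('5', "cinco"), ('6', "seis"), ('7', "sete"), ('J', "valete"), ('Q', "dama"), ('K', "rei")]

-- Source B's divide-and-conquer, on the code points (string[:mid]/string[mid:] = take/drop at 0 ≤ mid ≤ len)
def pvB (cs : List Char) : List Char :=
  if cs.length = 0 then []
  else if cs.length = 1 then (PySem.Dict.getD pvWordsDict (cs.getD 0 ' ') "").toList
  else
    pvB (cs.take (cs.length / 2)) ++ " e ".toList ++ pvB (cs.drop (cs.length / 2))
termination_by cs.length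
decreasing_by
  · simp only [List.length_take]; omega
  · simp only [List.length_drop]; omega

def POR_ESCRITO_alt (string : String) : String :=
  String.ofList (pvB string.toList)

-- ===== PRECONDITION & SPEC =====
def Spec_POR_ESCRITO (string : String) (out : String) : Prop := out = POR_ESCRITO_alt string
instance (string : String) (out : String) : Decidable (Spec_POR_ESCRITO string out) := by unfold Spec_POR_ESCRITO; infer_instance

-- ===== CLAIM (what is proved, stated in full; the proofs are below) =====
def Claim_equal_POR_ESCRITO : Prop := ∀ (string : String), Dom_POR_ESCRITO string → Spec_POR_ESCRITO string (POR_ESCRITO string)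

-- ===== LEMMAS AND PROOFS =====

-- closed-form rendering of A's loop's remaining work at position i: pre = (i > 0) at entry
def pvT (ds : List Char) (pre : Bool) : List Char :=
  match ds with
  | [] => []
  | c :: rest =>
      (if pre then "e ".toList else []) ++ pvWordA c ++
      (if rest = [] then [] else [' ']) ++ pvT rest true

theorem pvLoopA_eq_T : ∀ (ds cs : List Char) (i : Nat) (acc : List Char),
    cs.drop i = ds → pvLoopA cs i acc = acc ++ pvT ds (decide (i > 0)) := by
  intro ds
  induction ds with
  | nil =>
    intro cs i acc h
    have hlen : cs.length ≤ i := by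
      have := congrArg List.length h
      simp only [List.length_drop, List.length_nil] at this
      omega
    rw [pvLoopA]
    simp [pvT, Nat.not_lt.mpr hlen]
  | cons c rest ih =>
    intro cs i acc h
    have hlen : cs.length - i = rest.length + 1 := by
      have := congrArg List.length h
      simpa using this
    have hlt : i < cs.length := by omega
    have hget : cs.getD i ' ' = c := by
      have h1 : cs[i]? = some c := by
        rw [← List.head?_drop, h]; rfl
      simp [List.getD_eq_getElem?_getD, h1]
    have hdrop : cs.drop (i + 1) = rest := by
      have h2 := congrArg (List.drop 1) h
      rw [List.drop_drop] at h2
      simpa [Nat.add_comm] using h2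
    rw [pvLoopA]
    simp only [if_pos hlt, hget]
    rw [ih cs (i + 1) _ hdrop]
    simp only [pvT, decide_eq_true_eq]
    by_cases hr : rest = []
    · have hnl : ¬ i < cs.length - 1 := by
        subst hr; simp at hlen; omega
      by_cases hi : 0 < i <;> simp [hr, hnl, hi, List.append_assoc]
    · have hl : i < cs.length - 1 := by
        have : 0 < rest.length := List.length_pos_iff.mpr hr
        omega
      by_cases hi : 0 < i <;> simp [hr, hl, hi, List.append_assoc]

-- the dict lookup in B agrees with A's if/elif chain, char by char
set_option maxRecDepth 4000 in
theorem pvWord_eq (c : Char) :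
    (PySem.Dict.getD pvWordsDict c "").toList = pvWordA c := by
  by_cases h0 : c = '1'
  · subst h0; rfl
  by_cases h1 : c = '2'
  · subst h1; rfl
  by_cases h2 : c = '3'
  · subst h2; rfl
  by_cases h3 : c = '4'
  · subst h3; rfl
  by_cases h4 : c = '5'
  · subst h4; rfl
  by_cases h5 : c = '6'
  · subst h5; rfl
  by_cases h6 : c = '7'
  · subst h6; rfl
  by_cases h7 : c = 'J'
  · subst h7; rfl
  by_cases h8 : c = 'Q'
  · subst h8; rfl
  by_cases h9 : c = 'K'
  · subst h9; rfl
  have hmk : pvWordsDict = PySem.Dict.mk [('1', "um"), ('2', "dois"), ('3', "tres"), ('4', "quatro"), ('5', "cinco"), ('6', "seis"), ('7', "sete"), ('J', "valete"), ('Q', "dama"), ('K', "rei")] := by rfl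
  rw [hmk]
  simp only [PySem.Dict.getD_eq_get?_getD, PySem.Dict.get?_mk_cons, beq_iff_eq]
  rw [if_neg (fun h => h0 h.symm)]
  rw [if_neg (fun h => h1 h.symm)]
  rw [if_neg (fun h => h2 h.symm)]
  rw [if_neg (fun h => h3 h.symm)]
  rw [if_neg (fun h => h4 h.symm)]
  rw [if_neg (fun h => h5 h.symm)]
  rw [if_neg (fun h => h6 h.symm)]
  rw [if_neg (fun h => h7 h.symm)]
  rw [if_neg (fun h => h8 h.symm)]
  rw [if_neg (fun h => h9 h.symm)]
  rw [show (PySem.Dict.mk ([] : List (Char × String))).get? c = none from rfl]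
  simp only [Option.getD_none]
  rw [pvWordA, if_neg h0, if_neg h1, if_neg h2, if_neg h3, if_neg h4, if_neg h5, if_neg h6, if_neg h7, if_neg h8, if_neg h9]
  rfl

theorem pvT_true_eq (ds : List Char) (h : ds ≠ []) :
    pvT ds true = "e ".toList ++ pvT ds false := by
  cases ds with
  | nil => exact absurd rfl h
  | cons c rest => simp [pvT]

-- A's loop renders exactly the ' e '-join of the per-char words
theorem pvT_eq_join : ∀ (ds : List Char),
    pvT ds false = PySem.Chars.join " e ".toList (ds.map pvWordA) := by
  intro ds
  induction ds with
  | nil => simp [pvT, PySem.Chars.join_nil]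
  | cons c rest ih =>
    cases rest with
    | nil => simp [pvT, PySem.Chars.join_singleton]
    | cons d rest' =>
      have h1 : pvT (c :: d :: rest') false
          = pvWordA c ++ ([' '] ++ pvT (d :: rest') true) := by
        simp [pvT]
      rw [h1, pvT_true_eq _ (by simp), ih]
      simp only [List.map_cons]
      rw [PySem.Chars.join_cons_cons]
      simp [List.append_assoc]

-- join distributes over a split into two nonempty halves
theorem pvJoin_append (sep : List Char) :
    ∀ (xs ys : List (List Char)), xs ≠ [] → ys ≠ [] →
      PySem.Chars.join sep (xs ++ ys)
        = PySem.Chars.join sep xs ++ sep ++ PySem.Chars.join sep ys := by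
  intro xs
  induction xs with
  | nil => intro ys h; exact absurd rfl h
  | cons a rest ih =>
    intro ys _ hy
    cases rest with
    | nil =>
      cases ys with
      | nil => exact absurd rfl hy
      | cons b ys' =>
        simp [PySem.Chars.join_cons_cons, PySem.Chars.join_singleton, List.append_assoc]
    | cons a2 rest2 =>
      have h2 := ih ys (by simp) hy
      simp only [List.cons_append] at h2 ⊢
      rw [PySem.Chars.join_cons_cons, PySem.Chars.join_cons_cons, h2]
      simp [List.append_assoc]

-- B's divide-and-conquer renders the same join
theorem pvB_eq_join (cs : List Char) :
    pvB cs = PySem.Chars.join " e ".toList (cs.map pvWordA) := by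
  rw [pvB]
  by_cases h0 : cs.length = 0
  · have : cs = [] := List.length_eq_zero_iff.mp h0
    subst this
    simp [PySem.Chars.join_nil]
  by_cases h1 : cs.length = 1
  · obtain ⟨c, hc⟩ := List.length_eq_one_iff.mp h1
    subst hc
    simp [h1, PySem.Chars.join_singleton, pvWord_eq]
  · have h2 : 2 ≤ cs.length := by omega
    have hm1 : 1 ≤ cs.length / 2 := by omega
    have hm2 : cs.length / 2 < cs.length := by omega
    rw [if_neg h0, if_neg h1]
    rw [pvB_eq_join (cs.take (cs.length / 2)), pvB_eq_join (cs.drop (cs.length / 2))]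
    have ht : (cs.take (cs.length / 2)).map pvWordA ≠ [] := by
      have hpos : 0 < (cs.take (cs.length / 2)).length := by
        rw [List.length_take]; omega
      intro h
      rw [List.map_eq_nil_iff] at h
      simp [h] at hpos
    have hd : (cs.drop (cs.length / 2)).map pvWordA ≠ [] := by
      have hpos : 0 < (cs.drop (cs.length / 2)).length := by
        rw [List.length_drop]; omega
      intro h
      rw [List.map_eq_nil_iff] at h
      simp [h] at hpos
    rw [← pvJoin_append _ _ _ ht hd, ← List.map_append, List.take_append_drop]
termination_by cs.length
decreasing_by
  · simp only [List.length_take]; omega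
  · simp only [List.length_drop]; omega

-- ===== VERDICT (by name: the statement is the Claim_ definition above) =====
theorem POR_ESCRITO_spec : Claim_equal_POR_ESCRITO := by
  intro s _
  unfold Spec_POR_ESCRITO POR_ESCRITO POR_ESCRITO_alt
  have h1 : pvLoopA s.toList 0 [] = pvT s.toList false := by
    simpa using pvLoopA_eq_T s.toList s.toList 0 [] (by simp : List.drop 0 s.toList = s.toList)
  rw [h1, pvT_eq_join, pvB_eq_join]
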